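-- pv_equiv track=rewrite | github.com/adarshmalapaka/VLSI-Design-Automation-Project | PE_plot.py | checkBallot
-- ===== SOURCE A (Python) =====
-- def checkBallot(s):
--     a = 0
--     b = 0
--     for i in range(len(s)):
--         if (s[i]=='H' or s[i]=='V'):
--             a += 1
--         if (s[i]!='V' and s[i]!='H'):
--             b += 1
--         if (a >= b):
--             return False
--
--     return True
-- ===== SOURCE B (Python) =====
-- def checkBallot(s):
--     # Maximum prefix balance via a right-to-left fold (Kadane-style):
--     # for a string c + rest, max over nonempty prefixes of the +1/-1 sums
--     # equals step(c) + max(0, best(rest)).  best = -1 is a neutral sentinel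
--     # for the empty string.  A returns True iff every prefix balance is < 0,
--     # i.e. iff the maximum prefix balance is < 0.
--     best = -1
--     for c in reversed(s):
--         best = (1 if c in 'HV' else -1) + max(0, best)
--     return best < 0
-- ===== Notes on version B (the rewrite author's own statement) =====
-- stated objective: alternative
-- what changed: Instead of scanning left-to-right with two counters and an early exit, B folds the string right-to-left computing the maximum prefix balance (Kadane-style recurrence step + max(0, best)) and performs a single final comparison with 0.
import Mathlib
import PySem

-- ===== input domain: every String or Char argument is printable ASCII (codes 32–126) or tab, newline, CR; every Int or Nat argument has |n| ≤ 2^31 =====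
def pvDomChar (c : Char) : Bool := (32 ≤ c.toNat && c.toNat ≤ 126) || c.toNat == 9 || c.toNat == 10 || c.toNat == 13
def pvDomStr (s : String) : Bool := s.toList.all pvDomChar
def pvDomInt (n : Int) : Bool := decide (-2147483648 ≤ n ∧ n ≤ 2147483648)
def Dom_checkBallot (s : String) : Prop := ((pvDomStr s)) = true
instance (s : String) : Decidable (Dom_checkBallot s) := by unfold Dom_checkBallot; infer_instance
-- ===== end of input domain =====

-- B computes the maximum prefix balance by a right-to-left Kadane-style fold and compares it to 0 once, replacing A's two-counter early-exit scan; alternative decomposition, same cost.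


-- ===== PORT A =====
-- the index loop with counters a, b and the early 'return False'
def checkBallotLoop : List Char → Int → Int → Bool
  | [], _, _ => true
  | c :: rest, a, b =>
    let a' := if c = 'H' ∨ c = 'V' then a + 1 else a
    let b' := if c ≠ 'V' ∧ c ≠ 'H' then b + 1 else b
    if a' ≥ b' then false else checkBallotLoop rest a' b'

def checkBallot (s : String) : Bool := checkBallotLoop s.toList 0 0

-- ===== PORT B =====
-- right-to-left fold computing the maximum prefix balance (sentinel -1 for the empty string)
def pvMaxPref (l : List Char) : Int :=
  l.foldr (fun c best => (if c = 'H' ∨ c = 'V' then (1 : Int) else -1) + max 0 best) (-1)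

def checkBallot_alt (s : String) : Bool := decide (pvMaxPref s.toList < 0)

-- ===== PRECONDITION & SPEC =====
def Spec_checkBallot (s : String) (out : Bool) : Prop := out = checkBallot_alt s
instance (s : String) (out : Bool) : Decidable (Spec_checkBallot s out) := by unfold Spec_checkBallot; infer_instance

-- ===== CLAIM (what is proved, stated in full; the proofs are below) =====
def Claim_equal_checkBallot : Prop := ∀ (s : String), Dom_checkBallot s → Spec_checkBallot s (checkBallot s)

-- ===== LEMMAS AND PROOFS =====

-- ===== VERDICT (by name: the statement is the Claim_ definition above) =====
theorem loop_eq (l : List Char) (a b : Int) :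
    checkBallotLoop l a b = decide (l = [] ∨ a - b + pvMaxPref l < 0) := by
  induction l generalizing a b with
  | nil => simp [checkBallotLoop]
  | cons c rest ih =>
    simp only [checkBallotLoop, pvMaxPref, List.foldr] at *
    by_cases h : c = 'H' ∨ c = 'V'
    · have hb : ¬ (c ≠ 'V' ∧ c ≠ 'H') := by tauto
      simp only [if_pos h, if_neg hb]
      by_cases hge : a + 1 ≥ b
      · have hm := le_max_left (0:Int) (List.foldr (fun c best => (if c = 'H' ∨ c = 'V' then (1:Int) else -1) + max 0 best) (-1) rest)
        simp [hge]
        omega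
      · rw [if_neg hge, ih]
        have hd : a + 1 - b ≥ 1 + 0 → False := by omega
        by_cases hr : rest = []
        · subst hr; simp; omega
        · simp [hr]
          constructor <;> intro hlt <;>
            rcases le_or_gt (List.foldr (fun c best => (if c = 'H' ∨ c = 'V' then (1:Int) else -1) + max 0 best) (-1) rest) 0 with h0 | h0
          · rw [max_eq_left h0]; omega
          · rw [max_eq_right (le_of_lt h0)]; omega
          · rw [max_eq_left h0] at hlt; omega
          · rw [max_eq_right (le_of_lt h0)] at hlt; omega
    · have hb : c ≠ 'V' ∧ c ≠ 'H' := by tauto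
      simp only [if_neg h, if_pos hb]
      by_cases hge : a ≥ b + 1
      · have hm := le_max_left (0:Int) (List.foldr (fun c best => (if c = 'H' ∨ c = 'V' then (1:Int) else -1) + max 0 best) (-1) rest)
        simp [hge]
        omega
      · rw [if_neg hge, ih]
        by_cases hr : rest = []
        · subst hr; simp; omega
        · simp [hr]
          constructor <;> intro hlt <;>
            rcases le_or_gt (List.foldr (fun c best => (if c = 'H' ∨ c = 'V' then (1:Int) else -1) + max 0 best) (-1) rest) 0 with h0 | h0
          · rw [max_eq_left h0]; omega
          · rw [max_eq_right (le_of_lt h0)]; omega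
          · rw [max_eq_left h0] at hlt; omega
          · rw [max_eq_right (le_of_lt h0)] at hlt; omega

theorem checkBallot_spec : Claim_equal_checkBallot := by
  intro s _
  unfold Spec_checkBallot checkBallot checkBallot_alt
  rw [loop_eq]
  by_cases hr : s.toList = []
  · simp [hr, pvMaxPref]
  · simp [hr]
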